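-- pv_equiv track=rewrite | github.com/dongwoo46/algorithme_solving | 프로그래머스/lv2/12973. 짝지어 제거하기/짝지어 제거하기.py | solution
-- ===== SOURCE A (Python) =====
-- def solution(s):
--     answer = -1
--     lst = []
--
--     for i in s:
--         if len(lst)!=0 and lst[-1] != i:
--             lst.append(i)
--             continue
--         if len(lst)!=0 and lst[-1] == i:
--             lst.pop()
--             continue
--         if len(lst) == 0:
--             lst.append(i)
--
--     if len(lst) == 0:
--         answer = 1
--     else:
--         answer = 0
--
--
--     return answer
-- ===== SOURCE B (Python) =====
-- def solution(s):
--     while True: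
--         out = []
--         i = 0
--         n = len(s)
--         while i < n:
--             if i + 1 < n and s[i] == s[i + 1]:
--                 i += 2
--             else:
--                 out.append(s[i])
--                 i += 1
--         t = "".join(out)
--         if t == s:
--             break
--         s = t
--     return 1 if s == "" else 0
-- ===== Notes on version B (the rewrite author's own statement) =====
-- stated objective: alternative
-- what changed: Replaces the single left-to-right stack pass with repeated whole-string passes that delete non-overlapping adjacent equal pairs until a fixed point, then tests emptiness (relies on confluence of pair removal).
import Mathlib
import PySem

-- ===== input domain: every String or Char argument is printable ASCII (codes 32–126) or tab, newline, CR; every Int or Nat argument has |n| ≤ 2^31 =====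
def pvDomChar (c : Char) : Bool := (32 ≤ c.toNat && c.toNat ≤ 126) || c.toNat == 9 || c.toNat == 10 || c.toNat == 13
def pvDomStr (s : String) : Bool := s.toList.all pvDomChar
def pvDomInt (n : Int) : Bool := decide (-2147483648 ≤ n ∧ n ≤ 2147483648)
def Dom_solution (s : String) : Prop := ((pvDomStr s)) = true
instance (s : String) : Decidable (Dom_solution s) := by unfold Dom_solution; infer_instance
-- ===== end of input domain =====

-- B replaces A's single stack pass by iterated global removal of adjacent equal pairs
-- to a fixed point (different decomposition, not faster; the emptiness result agrees).

-- ===== PORT A =====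
-- one iteration of A's for-loop body (branches in A's order; lst[-1] = getLast?, pop = dropLast)
def aStep (lst : List Char) (i : Char) : List Char :=
  if lst.length ≠ 0 ∧ lst.getLast? ≠ some i then lst ++ [i]
  else if lst.length ≠ 0 ∧ lst.getLast? = some i then lst.dropLast
  else if lst.length = 0 then lst ++ [i]
  else lst

def solution (s : String) : Int :=
  -- answer = -1 is dead: it is always overwritten below
  let lst := s.toList.foldl aStep []
  if lst.length = 0 then 1 else 0

-- ===== PORT B =====
-- one scan of Source B's inner while loop: drop non-overlapping adjacent equal pairs
def goB : List Char → List Char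
  | [] => []
  | [a] => [a]
  | a :: b :: t => if a = b then goB t else a :: goB (b :: t)

theorem goB_eq_pair (b : Char) (t : List Char) : goB (b :: b :: t) = goB t := by
  simp [goB]

theorem goB_eq_ne {a b : Char} (t : List Char) (h : ¬ a = b) :
    goB (a :: b :: t) = a :: goB (b :: t) := by
  simp [goB, h]

theorem goB_length_le : ∀ l : List Char, (goB l).length ≤ l.length := by
  intro l
  induction l using goB.induct with
  | case1 => simp [goB]
  | case2 => simp [goB]
  | case3 b t ih => rw [goB_eq_pair]; simp only [List.length_cons]; omega
  | case4 a b t h ih =>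
      rw [goB_eq_ne t h]
      have := ih
      simp only [List.length_cons] at *
      omega

theorem goB_progress : ∀ l : List Char, goB l ≠ l → (goB l).length < l.length := by
  intro l
  induction l using goB.induct with
  | case1 => simp [goB]
  | case2 => simp [goB]
  | case3 b t ih =>
      intro _
      rw [goB_eq_pair]
      have := goB_length_le t
      simp only [List.length_cons]; omega
  | case4 a b t h ih =>
      intro hne
      rw [goB_eq_ne t h] at hne ⊢
      have hne2 : goB (b :: t) ≠ b :: t := by
        intro he; exact hne (by rw [he])
      have := ih hne2
      simp only [List.length_cons] at *
      omega

-- Source B's outer while True: iterate goB to a fixed point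
def fixB (l : List Char) : List Char :=
  let t := goB l
  if h : t = l then l else fixB t
termination_by l.length
decreasing_by exact goB_progress l h

def solution_alt (s : String) : Int :=
  if fixB s.toList = [] then 1 else 0

-- ===== PRECONDITION & SPEC =====
def Spec_solution (s : String) (out : Int) : Prop := out = solution_alt s
instance (s : String) (out : Int) : Decidable (Spec_solution s out) := by unfold Spec_solution; infer_instance

-- ===== CLAIM (what is proved, stated in full; the proofs are below) =====
def Claim_equal_solution : Prop := ∀ (s : String), Dom_solution s → Spec_solution s (solution s)

-- ===== LEMMAS AND PROOFS =====

-- the canonical head-stack push (A's aStep viewed from the other end of the list)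
def push (st : List Char) (c : Char) : List Char :=
  if st.head? = some c then st.tail else c :: st

theorem aStep_eq_push (lst : List Char) (i : Char) :
    aStep lst i = (push lst.reverse i).reverse := by
  cases lst using List.reverseRecOn with
  | nil => simp [aStep, push]
  | append_singleton l a =>
      by_cases h : a = i
      · subst h
        simp [aStep, push]
      · simp [aStep, push, h]

theorem foldl_aStep_eq_push (l : List Char) (lst : List Char) :
    l.foldl aStep lst = (l.foldl push lst.reverse).reverse := by
  induction l generalizing lst with
  | nil => simp
  | cons a t ih =>
      simp only [List.foldl_cons, aStep_eq_push, ih, List.reverse_reverse]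

theorem chain_push {st : List Char} (h : List.IsChain (· ≠ ·) st) (c : Char) :
    List.IsChain (· ≠ ·) (push st c) := by
  unfold push
  split
  · exact h.tail
  · rename_i hne
    cases st with
    | nil => simp
    | cons x xs =>
        refine List.isChain_cons_cons.mpr ⟨?_, h⟩
        simp only [List.head?_cons] at hne
        intro he; exact hne (by rw [he])

theorem push_push {st : List Char} (h : List.IsChain (· ≠ ·) st) (c : Char) :
    push (push st c) c = st := by
  cases st with
  | nil => simp [push]
  | cons x xs =>
      by_cases hx : x = c
      · subst hx
        cases xs with
        | nil => simp [push]
        | cons y ys =>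
            have hxy : x ≠ y := (List.isChain_cons_cons.mp h).1
            simp [push, Ne.symm hxy]
      · simp [push, hx]

theorem foldl_push_goB (l : List Char) :
    ∀ st : List Char, List.IsChain (· ≠ ·) st →
      (goB l).foldl push st = l.foldl push st := by
  induction l using goB.induct with
  | case1 => intro st _; simp [goB]
  | case2 => intro st _; simp [goB]
  | case3 b t ih =>
      intro st hst
      rw [goB_eq_pair]
      simp only [List.foldl_cons]
      rw [ih st hst, push_push hst]
  | case4 a b t h ih =>
      intro st hst
      rw [goB_eq_ne t h]
      simp only [List.foldl_cons]
      exact ih (push st a) (chain_push hst a)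

theorem goB_fix_chain : ∀ l : List Char, goB l = l → List.IsChain (· ≠ ·) l := by
  intro l
  induction l using goB.induct with
  | case1 => intro _; simp
  | case2 => intro _; simp
  | case3 b t ih =>
      intro he
      exfalso
      have h1 := goB_length_le t
      have h2 : (goB (b :: b :: t)).length = t.length + 2 := by
        rw [he]; simp
      rw [goB_eq_pair] at h2
      omega
  | case4 a b t h ih =>
      intro he
      rw [goB_eq_ne t h] at he
      have ht : goB (b :: t) = b :: t := (List.cons.inj he).2
      exact List.isChain_cons_cons.mpr ⟨h, ih ht⟩

theorem chain_foldl_push (l : List Char) :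
    ∀ st : List Char, List.IsChain (· ≠ ·) l →
      (∀ a, l.head? = some a → st.head? ≠ some a) →
      l.foldl push st = l.reverse ++ st := by
  induction l with
  | nil => simp
  | cons a t ih =>
      intro st hc hh
      have hpush : push st a = a :: st := by
        unfold push
        rw [if_neg (hh a rfl)]
      simp only [List.foldl_cons, hpush]
      rw [ih (a :: st) hc.tail ?_]
      · simp
      · intro b hb hcontra
        simp only [List.head?_cons, Option.some.injEq] at hcontra
        subst hcontra
        cases t with
        | nil => simp at hb
        | cons c cs =>
            simp only [List.head?_cons, Option.some.injEq] at hb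
            exact (List.isChain_cons_cons.mp hc).1 (hb ▸ rfl)

theorem fixB_eq_fix {l : List Char} (h : goB l = l) : fixB l = l := by
  rw [fixB]; simp [h]

theorem fixB_eq_step {l : List Char} (h : ¬ goB l = l) : fixB l = fixB (goB l) := by
  rw [fixB]; simp [h]

theorem fixB_fixed (l : List Char) : goB (fixB l) = fixB l := by
  induction l using fixB.induct with
  | case1 x t h =>
      rw [fixB_eq_fix h]
      exact h
  | case2 x t h ih =>
      rw [fixB_eq_step h]
      exact ih

theorem fixB_push (l : List Char) :
    (fixB l).foldl push [] = l.foldl push [] := by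
  induction l using fixB.induct with
  | case1 x t h =>
      rw [fixB_eq_fix h]
  | case2 x t h ih =>
      rw [fixB_eq_step h]
      rw [ih, foldl_push_goB x [] (by simp)]

theorem fixB_empty_iff (l : List Char) : fixB l = [] ↔ l.foldl push [] = [] := by
  constructor
  · intro h
    have := fixB_push l
    rw [h] at this
    simpa using this.symm
  · intro h
    have hfix := fixB_fixed l
    have hchain := goB_fix_chain _ hfix
    have := fixB_push l
    rw [h] at this
    rw [chain_foldl_push (fixB l) [] hchain (by simp)] at this
    simpa using this

-- ===== VERDICT (by name: the statement is the Claim_ definition above) =====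
theorem solution_spec : Claim_equal_solution := by
  intro s _
  unfold Spec_solution solution solution_alt
  rw [foldl_aStep_eq_push]
  have h := fixB_empty_iff s.toList
  by_cases he : s.toList.foldl push [] = []
  · rw [if_pos (h.mpr he)]
    simp [he]
  · rw [if_neg (fun hc => he (h.mp hc))]
    simp [he]
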